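-- pv_equiv track=rewrite | github.com/Majbor1/mocktests3 | mocktest3 - 2/p1.py | f
-- ===== SOURCE A (Python) =====
-- def f(n):
--     n = str(n)
--     odds = []
--     for char in n:
--         if int(char) % 2 != 0:
--             odds.append(int(char))
--
--     if len(odds) == 0:
--         return -1
--     elif len(odds) == 1:
--         return 0
--     else:
--         smallest = min(odds)
--         largest = max(odds)
--         return largest - smallest
-- ===== SOURCE B (Python) =====
-- def f(n):
--     # single arithmetic pass over the digits, tracking running min/max of odd digits
--     lo = hi = None
--     m = abs(n)
--     while True:
--         d = m % 10
--         if d % 2 != 0: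
--             if lo is None:
--                 lo = hi = d
--             else:
--                 if d < lo:
--                     lo = d
--                 if d > hi:
--                     hi = d
--         m //= 10
--         if m == 0:
--             break
--     return -1 if lo is None else hi - lo
-- ===== Notes on version B (the rewrite author's own statement) =====
-- stated objective: alternative
-- what changed: B extracts digits arithmetically (m % 10, m //= 10) in one pass maintaining running min/max of odd digits, instead of A's str(n) conversion, building a list of odd digits and separate min()/max() calls.
import Mathlib
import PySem

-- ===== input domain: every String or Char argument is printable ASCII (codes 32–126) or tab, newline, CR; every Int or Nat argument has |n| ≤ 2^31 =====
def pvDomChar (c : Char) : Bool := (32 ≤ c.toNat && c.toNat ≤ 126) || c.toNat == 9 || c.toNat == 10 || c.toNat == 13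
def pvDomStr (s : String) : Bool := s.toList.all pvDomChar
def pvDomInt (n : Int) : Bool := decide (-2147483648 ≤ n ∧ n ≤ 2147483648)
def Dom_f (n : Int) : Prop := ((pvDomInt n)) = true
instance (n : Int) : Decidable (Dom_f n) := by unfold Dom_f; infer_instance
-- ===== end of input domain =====

-- B replaces A's str(n)/list/min()/max() pipeline by one arithmetic pass over the digits
-- keeping running extrema (objective: alternative; same O(d) cost).

-- ===== PORT A =====
-- int(char): PySem.Int.ofChars? is exact; the .getD 0 default is only reached where Python
-- raises ValueError (the '-' of a negative n), which Pre_f excludes.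
def f (n : Int) : Int :=
  let s : List Char := PySem.Int.toChars n   -- n = str(n); iterate its characters
  let odds : List Int := s.foldl
    (fun acc c =>
      if PySem.Int.mod ((PySem.Int.ofChars? [c]).getD 0) 2 ≠ 0
      then acc ++ [(PySem.Int.ofChars? [c]).getD 0]
      else acc) []
  if odds.length = 0 then -1
  else if odds.length = 1 then 0
  else
    ((PySem.List.max? odds (fun x => x)).getD 0) -
      ((PySem.List.min? odds (fun x => x)).getD 0)

-- ===== PORT B =====
-- m = abs(n) ≥ 0 throughout, so Nat % and / coincide with Python's % and // here (exact).
def fAltLoop (m : Nat) (st : Option Int × Option Int) : Option Int × Option Int :=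
  let d : Int := ((m % 10 : Nat) : Int)
  let st' : Option Int × Option Int :=
    if PySem.Int.mod d 2 ≠ 0 then
      match st with
      | (none, _) => (some d, some d)
      | (some lo, hi) =>
          (if d < lo then some d else some lo,
           if hi.getD 0 < d then some d else hi)
    else st
  if m / 10 = 0 then st' else fAltLoop (m / 10) st'
termination_by m
decreasing_by exact Nat.div_lt_self (by omega) (by omega)

def f_alt (n : Int) : Int :=
  match fAltLoop n.natAbs (none, none) with
  | (none, _) => -1
  | (some lo, hi) => hi.getD 0 - lo

-- ===== PRECONDITION & SPEC =====
-- Pre_f excludes exactly the inputs where A raises: for n < 0 the first character of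
-- str(n) is '-', and int('-') raises ValueError.
def Pre_f (n : Int) : Prop := 0 ≤ n
instance (n : Int) : Decidable (Pre_f n) := by unfold Pre_f; infer_instance
def pvWitness_f : Int := 135

def Spec_f (n : Int) (out : Int) : Prop := out = f_alt n
instance (n : Int) (out : Int) : Decidable (Spec_f n out) := by unfold Spec_f; infer_instance

-- ===== CLAIM (what is proved, stated in full; the proofs are below) =====
def Claim_equal_f : Prop := ∀ (n : Int), Dom_f n → Pre_f n → Spec_f n (f n)

-- ===== LEMMAS AND PROOFS =====

-- little-endian digit list matching B's do-while loop: bDigitsN 0 = [0]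
def bDigitsN (m : Nat) : List Nat :=
  m % 10 :: (if m / 10 = 0 then [] else bDigitsN (m / 10))
termination_by m
decreasing_by exact Nat.div_lt_self (by omega) (by omega)

-- one step of B's loop on the state (running min, running max)
def bStep (st : Option Int × Option Int) (d : Nat) : Option Int × Option Int :=
  if PySem.Int.mod (d : Int) 2 ≠ 0 then
    match st with
    | (none, _) => (some (d : Int), some (d : Int))
    | (some lo, hi) =>
        (if (d : Int) < lo then some (d : Int) else some lo,
         if hi.getD 0 < (d : Int) then some (d : Int) else hi)
  else st

-- the odd digits, as Ints
def oddInt (d : Nat) : Option Int :=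
  if PySem.Int.mod (d : Int) 2 ≠ 0 then some (d : Int) else none

lemma oddInt_some (d : Nat) (h : PySem.Int.mod (d : Int) 2 ≠ 0) :
    oddInt d = some (d : Int) := by unfold oddInt; rw [if_pos h]

lemma oddInt_none (d : Nat) (h : ¬ PySem.Int.mod (d : Int) 2 ≠ 0) :
    oddInt d = none := by unfold oddInt; rw [if_neg h]

lemma parse_digitChar (d : Nat) (h : d < 10) :
    PySem.Int.ofChars? [Nat.digitChar d] = some (d : Int) := by
  interval_cases d <;> decide

lemma toDigitsCore_eq (fuel : Nat) : ∀ (m : Nat) (ds : List Char), m < fuel →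
    Nat.toDigitsCore 10 fuel m ds = (bDigitsN m).reverse.map Nat.digitChar ++ ds := by
  induction fuel with
  | zero => intro m ds h; omega
  | succ fuel ih =>
    intro m ds h
    rw [Nat.toDigitsCore, bDigitsN]
    by_cases h10 : m / 10 = 0
    · simp [h10]
    · have hlt : m / 10 < fuel := by
        have hd : m / 10 < m := Nat.div_lt_self (by omega) (by omega)
        omega
      simp only [h10, if_false, ih (m / 10) _ hlt]
      simp

lemma toDigits_eq (m : Nat) :
    Nat.toDigits 10 m = (bDigitsN m).reverse.map Nat.digitChar := by
  rw [Nat.toDigits, toDigitsCore_eq (m + 1) m [] (by omega)]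
  simp

lemma bDigitsN_lt (m : Nat) : ∀ d ∈ bDigitsN m, d < 10 := by
  induction m using Nat.strong_induction_on with
  | _ m ih =>
    intro d hd
    rw [bDigitsN] at hd
    by_cases h10 : m / 10 = 0
    · simp [h10] at hd; omega
    · simp only [if_neg h10, List.mem_cons] at hd
      rcases hd with h | h
      · omega
      · exact ih (m / 10) (Nat.div_lt_self (by omega) (by omega)) d h

lemma odds_foldl (l : List Nat) (hl : ∀ d ∈ l, d < 10) (acc : List Int) :
    (l.map Nat.digitChar).foldl
      (fun acc c =>
        if PySem.Int.mod ((PySem.Int.ofChars? [c]).getD 0) 2 ≠ 0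
        then acc ++ [(PySem.Int.ofChars? [c]).getD 0]
        else acc) acc = acc ++ l.filterMap oddInt := by
  induction l generalizing acc with
  | nil => simp
  | cons d t ih =>
    simp only [List.map_cons, List.foldl_cons,
      parse_digitChar d (hl d (by simp)), Option.getD_some]
    by_cases hodd : PySem.Int.mod (d : Int) 2 ≠ 0
    · rw [if_pos hodd, ih (fun e he => hl e (by simp [he])),
        List.filterMap_cons_some (oddInt_some d hodd)]
      simp
    · rw [if_neg hodd, ih (fun e he => hl e (by simp [he])),
        List.filterMap_cons_none (oddInt_none d hodd)]

lemma fAltLoop_foldl (m : Nat) (st : Option Int × Option Int) :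
    fAltLoop m st = (bDigitsN m).foldl bStep st := by
  induction m using Nat.strong_induction_on generalizing st with
  | _ m ih =>
    rw [fAltLoop.eq_def, bDigitsN]
    by_cases h10 : m / 10 = 0
    · simp only [h10, List.foldl_cons]
      rfl
    · simp only [if_neg h10, List.foldl_cons]
      rw [ih (m / 10) (Nat.div_lt_self (by omega) (by omega))]
      rfl

lemma foldl_min_spec (t : List Int) (x : Int) :
    t.foldl min x ∈ x :: t ∧ ∀ y ∈ x :: t, t.foldl min x ≤ y := by
  induction t generalizing x with
  | nil => simp
  | cons a t ih =>
    simp only [List.foldl_cons]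
    obtain ⟨h1, h2⟩ := ih (min x a)
    have hF : List.foldl min (min x a) t ≤ min x a := h2 (min x a) (by simp)
    constructor
    · rcases List.mem_cons.1 h1 with h | h
      · rcases min_choice x a with hc | hc
        · rw [h, hc]; exact List.mem_cons.2 (Or.inl rfl)
        · rw [h, hc]; exact List.mem_cons.2 (Or.inr (List.mem_cons.2 (Or.inl rfl)))
      · exact List.mem_cons.2 (Or.inr (List.mem_cons.2 (Or.inr h)))
    · intro y hy
      rcases List.mem_cons.1 hy with h | h
      · subst h; exact le_trans hF (min_le_left _ _)
      · rcases List.mem_cons.1 h with h' | h'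
        · subst h'; exact le_trans hF (min_le_right _ _)
        · exact h2 y (List.mem_cons.2 (Or.inr h'))

lemma foldl_max_spec (t : List Int) (x : Int) :
    t.foldl max x ∈ x :: t ∧ ∀ y ∈ x :: t, y ≤ t.foldl max x := by
  induction t generalizing x with
  | nil => simp
  | cons a t ih =>
    simp only [List.foldl_cons]
    obtain ⟨h1, h2⟩ := ih (max x a)
    have hF : max x a ≤ List.foldl max (max x a) t := h2 (max x a) (by simp)
    constructor
    · rcases List.mem_cons.1 h1 with h | h
      · rcases max_choice x a with hc | hc
        · rw [h, hc]; exact List.mem_cons.2 (Or.inl rfl)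
        · rw [h, hc]; exact List.mem_cons.2 (Or.inr (List.mem_cons.2 (Or.inl rfl)))
      · exact List.mem_cons.2 (Or.inr (List.mem_cons.2 (Or.inr h)))
    · intro y hy
      rcases List.mem_cons.1 hy with h | h
      · subst h; exact le_trans (le_max_left _ _) hF
      · rcases List.mem_cons.1 h with h' | h'
        · subst h'; exact le_trans (le_max_right _ _) hF
        · exact h2 y (List.mem_cons.2 (Or.inr h'))

-- B's loop state after processing digits: running extrema of the odd digits seen
lemma bStep_some (l : List Nat) : ∀ (a b : Int),
    l.foldl bStep (some a, some b) =
      (some ((l.filterMap oddInt).foldl min a), some ((l.filterMap oddInt).foldl max b)) := by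
  induction l with
  | nil => simp
  | cons d t ih =>
    intro a b
    rw [List.foldl_cons]
    by_cases hodd : PySem.Int.mod (d : Int) 2 ≠ 0
    · rw [List.filterMap_cons_some (oddInt_some d hodd)]
      have hb : bStep (some a, some b) d =
          (some (min a (d : Int)), some (max b (d : Int))) := by
        unfold bStep
        rw [if_pos hodd]
        simp only [Option.getD_some]
        rw [Prod.mk.injEq]
        constructor
        · by_cases h : (d : Int) < a
          · rw [if_pos h, min_eq_right (by omega)]
          · rw [if_neg h, min_eq_left (by omega)]
        · by_cases h : b < (d : Int)
          · rw [if_pos h, max_eq_right (by omega)]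
          · rw [if_neg h, max_eq_left (by omega)]
      rw [hb, ih, List.foldl_cons, List.foldl_cons]
    · rw [List.filterMap_cons_none (oddInt_none d hodd)]
      have hb : bStep (some a, some b) d = (some a, some b) := by
        unfold bStep; rw [if_neg hodd]
      rw [hb, ih]

lemma bStep_none (l : List Nat) :
    l.foldl bStep (none, none) =
      match l.filterMap oddInt with
      | [] => ((none : Option Int), (none : Option Int))
      | x :: t => (some (t.foldl min x), some (t.foldl max x)) := by
  induction l with
  | nil => simp
  | cons d t ih =>
    rw [List.foldl_cons]
    by_cases hodd : PySem.Int.mod (d : Int) 2 ≠ 0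
    · rw [List.filterMap_cons_some (oddInt_some d hodd)]
      have hb : bStep (none, none) d = (some (d : Int), some (d : Int)) := by
        unfold bStep; rw [if_pos hodd]
      rw [hb, bStep_some]
    · rw [List.filterMap_cons_none (oddInt_none d hodd)]
      have hb : bStep ((none : Option Int), (none : Option Int)) d = (none, none) := by
        unfold bStep; rw [if_neg hodd]
      rw [hb, ih]

-- the two foldl extrema agree on reversed lists, by uniqueness of the minimum/maximum
lemma foldl_min_reverse (x : Int) (t : List Int) (y : Int) (u : List Int)
    (h : y :: u = (x :: t).reverse) : u.foldl min y = t.foldl min x := by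
  have hmem : ∀ z : Int, z ∈ y :: u ↔ z ∈ x :: t := by
    intro z; rw [h, List.mem_reverse]
  obtain ⟨m1, m2⟩ := foldl_min_spec u y
  obtain ⟨n1, n2⟩ := foldl_min_spec t x
  exact le_antisymm (m2 _ ((hmem _).2 n1)) (n2 _ ((hmem _).1 m1))

lemma foldl_max_reverse (x : Int) (t : List Int) (y : Int) (u : List Int)
    (h : y :: u = (x :: t).reverse) : u.foldl max y = t.foldl max x := by
  have hmem : ∀ z : Int, z ∈ y :: u ↔ z ∈ x :: t := by
    intro z; rw [h, List.mem_reverse]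
  obtain ⟨m1, m2⟩ := foldl_max_spec u y
  obtain ⟨n1, n2⟩ := foldl_max_spec t x
  exact le_antisymm (n2 _ ((hmem _).1 m1)) (m2 _ ((hmem _).2 n1))

-- ===== VERDICT (by name: the statement is the Claim_ definition above) =====
theorem f_spec : Claim_equal_f := by
  intro n _ hpre
  simp only [Spec_f, f, f_alt]
  have hnn : (0 : Int) ≤ n := hpre
  have habs : n.natAbs = n.toNat := by omega
  set m := n.toNat with hm
  have hchars : PySem.Int.toChars n = (bDigitsN m).reverse.map Nat.digitChar := by
    unfold PySem.Int.toChars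
    rw [if_neg (by omega)]
    exact toDigits_eq m
  rw [hchars, habs, fAltLoop_foldl, bStep_none,
    odds_foldl _ (fun d hd => bDigitsN_lt m d (List.mem_reverse.1 hd)) [],
    List.filterMap_reverse]
  simp only [List.nil_append]
  rcases hos : (bDigitsN m).filterMap oddInt with _ | ⟨x, t⟩
  · simp
  · rcases hrev : (x :: t).reverse with _ | ⟨y, u⟩
    · exact absurd hrev (by simp)
    · rw [PySem.List.max?_id_cons, PySem.List.min?_id_cons]
      simp only [Option.getD_some, List.length_cons]
      have hmin := foldl_min_reverse x t y u hrev.symm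
      have hmax := foldl_max_reverse x t y u hrev.symm
      rcases u with _ | ⟨u0, us⟩
      · -- the reversed odds list is a singleton, so A returns 0 = max - min
        have ht' : t = [] := by
          have h' := congrArg List.length hrev
          simp at h'
          exact h'
        subst ht'
        simp only [List.reverse_cons, List.reverse_nil, List.nil_append,
          List.cons.injEq] at hrev
        simp [hrev.1]
      · rw [if_neg (by simp), if_neg (by simp), hmin, hmax]
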